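-- pv_equiv track=rewrite | github.com/adamritter/lazyviewer | lazyviewer/preview/rendering.py | iter_diff_logical_line_ranges
-- ===== SOURCE A (Python) =====
-- def line_has_newline_terminator(line: str) -> bool:
--     return line.endswith("\n") or line.endswith("\r")
--
-- def iter_diff_logical_line_ranges(
--     text_lines: list[str],
--     wrap_text: bool,
-- ) -> list[tuple[int, int]]:
--     ranges: list[tuple[int, int]] = []
--     idx = 0
--     while idx < len(text_lines):
--         start_idx = idx
--         if wrap_text:
--             while idx < len(text_lines) - 1 and not line_has_newline_terminator(text_lines[idx]):
--                 idx += 1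
--         ranges.append((start_idx, idx))
--         idx += 1
--     return ranges
-- ===== SOURCE B (Python) =====
-- def line_has_newline_terminator(line: str) -> bool:
--     return line.endswith("\n") or line.endswith("\r")
--
-- def iter_diff_logical_line_ranges(
--     text_lines: list[str],
--     wrap_text: bool,
-- ) -> list[tuple[int, int]]:
--     n = len(text_lines)
--     ends = [i for i in range(n)
--             if i == n - 1 or not wrap_text or line_has_newline_terminator(text_lines[i])]
--     starts = [0] + [e + 1 for e in ends[:-1]]
--     return list(zip(starts, ends))
-- ===== Notes on version B (the rewrite author's own statement) =====
-- stated objective: alternative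
-- what changed: Replaces the nested while-loop index scan with a declarative boundary-detection pass (the list of range-end indices) followed by deriving start indices and zipping them into pairs.
import Mathlib
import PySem

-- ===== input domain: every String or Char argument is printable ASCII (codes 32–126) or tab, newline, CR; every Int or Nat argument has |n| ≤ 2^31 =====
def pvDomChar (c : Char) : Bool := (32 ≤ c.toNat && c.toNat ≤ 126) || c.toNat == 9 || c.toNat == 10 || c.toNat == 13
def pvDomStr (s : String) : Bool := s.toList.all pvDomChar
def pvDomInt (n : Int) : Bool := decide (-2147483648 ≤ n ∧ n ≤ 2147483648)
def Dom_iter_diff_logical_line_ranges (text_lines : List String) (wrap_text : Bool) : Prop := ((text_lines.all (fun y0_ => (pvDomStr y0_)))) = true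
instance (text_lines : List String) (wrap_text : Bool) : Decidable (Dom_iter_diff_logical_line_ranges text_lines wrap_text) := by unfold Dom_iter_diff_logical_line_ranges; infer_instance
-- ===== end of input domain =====

-- B replaces A's nested while-loop scan with a boundary-detection pass (list of range-end
-- indices) plus a pairing pass; equal return values, no side effects in either version.

-- ===== PORT A =====
def lineHasNewlineTerminator (line : String) : Bool :=
  PySem.Str.endswith line "\n" || PySem.Str.endswith line "\r"

-- inner while loop of A: advance idx while idx < len-1 and no newline terminator
def iterInner (tl : List String) (idx : Nat) : Nat :=
  if idx < tl.length - 1 && !lineHasNewlineTerminator (tl.getD idx "") then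
    iterInner tl (idx + 1)
  else idx
termination_by tl.length - idx
decreasing_by
  rename_i h
  simp only [Bool.and_eq_true, decide_eq_true_eq] at h
  omega

-- termination of the outer loop needs this: the inner loop never moves idx backwards
theorem iterInner_ge (tl : List String) (idx : Nat) : idx ≤ iterInner tl idx := by
  unfold iterInner
  split
  · have := iterInner_ge tl (idx + 1); omega
  · exact le_refl _
termination_by tl.length - idx
decreasing_by
  rename_i h
  simp only [Bool.and_eq_true, decide_eq_true_eq] at h
  omega

-- outer while loop of A
def iterGo (tl : List String) (wrap : Bool) (idx : Nat) : List (Int × Int) :=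
  if idx < tl.length then
    let j := if wrap then iterInner tl idx else idx
    ((idx : Int), (j : Int)) :: iterGo tl wrap (j + 1)
  else []
termination_by tl.length - idx
decreasing_by
  have h := iterInner_ge tl idx
  split <;> omega

def iter_diff_logical_line_ranges (text_lines : List String) (wrap_text : Bool) : List (Int × Int) :=
  iterGo text_lines wrap_text 0

-- ===== PORT B =====
def iter_diff_logical_line_ranges_alt (text_lines : List String) (wrap_text : Bool) : List (Int × Int) :=
  let n := text_lines.length
  let ends := (List.range n).filter
    (fun i => decide (i = n - 1) || !wrap_text || lineHasNewlineTerminator (text_lines.getD i ""))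
  let starts : List Nat := 0 :: ends.dropLast.map (· + 1)
  (starts.zip ends).map (fun p => ((p.1 : Int), (p.2 : Int)))

-- ===== PRECONDITION & SPEC =====
def Spec_iter_diff_logical_line_ranges (text_lines : List String) (wrap_text : Bool) (out : List (Int × Int)) : Prop := out = iter_diff_logical_line_ranges_alt text_lines wrap_text
instance (text_lines : List String) (wrap_text : Bool) (out : List (Int × Int)) : Decidable (Spec_iter_diff_logical_line_ranges text_lines wrap_text out) := by unfold Spec_iter_diff_logical_line_ranges; infer_instance

-- ===== CLAIM (what is proved, stated in full; the proofs are below) =====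
def Claim_equal_iter_diff_logical_line_ranges : Prop := ∀ (text_lines : List String) (wrap_text : Bool), Dom_iter_diff_logical_line_ranges text_lines wrap_text → Spec_iter_diff_logical_line_ranges text_lines wrap_text (iter_diff_logical_line_ranges text_lines wrap_text)

-- ===== LEMMAS AND PROOFS =====

-- the boundary predicate of B
def pvPred (tl : List String) (wrap : Bool) (i : Nat) : Bool :=
  decide (i = tl.length - 1) || !wrap || lineHasNewlineTerminator (tl.getD i "")

-- the ends that B would compute starting from index idx
def endsFrom (tl : List String) (wrap : Bool) (idx : Nat) : List Nat :=
  (List.range' idx (tl.length - idx)).filter (pvPred tl wrap)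

theorem iterInner_le (tl : List String) (idx : Nat) (h : idx ≤ tl.length - 1) :
    iterInner tl idx ≤ tl.length - 1 := by
  unfold iterInner
  split
  · rename_i hc
    simp only [Bool.and_eq_true, decide_eq_true_eq] at hc
    exact iterInner_le tl (idx + 1) (by omega)
  · exact h
termination_by tl.length - idx
decreasing_by
  rename_i hc
  simp only [Bool.and_eq_true, decide_eq_true_eq] at hc
  omega

theorem iterInner_between (tl : List String) (k : Nat) :
    ∀ (m idx : Nat), tl.length - idx ≤ m → idx ≤ k → k < iterInner tl idx →
      k < tl.length - 1 ∧ lineHasNewlineTerminator (tl.getD k "") = false := by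
  intro m
  induction m with
  | zero =>
    intro idx hm h1 h2
    rw [iterInner] at h2
    split at h2
    · rename_i hc
      simp only [Bool.and_eq_true, decide_eq_true_eq] at hc
      omega
    · omega
  | succ m ih =>
    intro idx hm h1 h2
    rw [iterInner] at h2
    split at h2
    · rename_i hc
      simp only [Bool.and_eq_true, Bool.not_eq_true', decide_eq_true_eq] at hc
      rcases Nat.eq_or_lt_of_le h1 with rfl | hlt
      · exact ⟨hc.1, hc.2⟩
      · exact ih (idx + 1) (by omega) hlt h2
    · omega

theorem iterInner_pred (tl : List String) (wrap : Bool) (idx : Nat) (h : idx < tl.length)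
    (hw : wrap = true) : pvPred tl wrap (iterInner tl idx) = true := by
  have hle : iterInner tl idx ≤ tl.length - 1 := iterInner_le tl idx (by omega)
  rw [iterInner]
  split
  · rename_i hc
    simp only [Bool.and_eq_true, decide_eq_true_eq] at hc
    exact iterInner_pred tl wrap (idx + 1) (by omega) hw
  · rename_i hc
    simp only [Bool.and_eq_true, Bool.not_eq_true', decide_eq_true_eq, not_and] at hc
    by_cases hend : idx = tl.length - 1
    · unfold pvPred
      simp [hend]
    · have hlt : idx < tl.length - 1 := by omega
      have hnl : lineHasNewlineTerminator (tl.getD idx "") = true := by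
        have h2 := hc hlt
        simpa using h2
      unfold pvPred
      rw [hnl]
      simp
termination_by tl.length - idx
decreasing_by
  rename_i hc
  simp only [Bool.and_eq_true, decide_eq_true_eq] at hc
  omega

theorem endsFrom_cons (tl : List String) (wrap : Bool) (idx j : Nat)
    (hij : idx ≤ j) (hj : j ≤ tl.length - 1) (hn : idx < tl.length)
    (hpj : pvPred tl wrap j = true)
    (hmid : ∀ k, idx ≤ k → k < j → pvPred tl wrap k = false) :
    endsFrom tl wrap idx = j :: endsFrom tl wrap (j + 1) := by
  unfold endsFrom
  have hjn : j < tl.length := by omega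
  have hsplit : List.range' idx (tl.length - idx) =
      List.range' idx (j - idx) ++ List.range' j (tl.length - j) := by
    rw [show tl.length - idx = (j - idx) + (tl.length - j) by omega,
        ← List.range'_append, Nat.one_mul, show idx + (j - idx) = j by omega]
  rw [hsplit, List.filter_append]
  have h1 : (List.range' idx (j - idx)).filter (pvPred tl wrap) = [] := by
    rw [List.filter_eq_nil_iff]
    intro k hk
    rw [List.mem_range'_1] at hk
    simp [hmid k hk.1 (by omega)]
  have h2 : List.range' j (tl.length - j) = j :: List.range' (j + 1) (tl.length - (j + 1)) := by
    have : tl.length - j = (tl.length - (j + 1)) + 1 := by omega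
    rw [this, List.range'_succ]
  rw [h1, h2, List.filter_cons_of_pos hpj, List.nil_append]

theorem endsFrom_nil (tl : List String) (wrap : Bool) (idx : Nat) (h : tl.length <= idx) :
    endsFrom tl wrap idx = [] := by
  unfold endsFrom
  have : tl.length - idx = 0 := by omega
  rw [this]
  rfl

theorem iterGo_eq (tl : List String) (wrap : Bool) :
    ∀ (m idx : Nat), tl.length - idx ≤ m →
      iterGo tl wrap idx =
        ((idx :: (endsFrom tl wrap idx).dropLast.map (· + 1)).zip
          (endsFrom tl wrap idx)).map (fun p => ((p.1 : Int), (p.2 : Int))) := by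
  intro m
  induction m with
  | zero =>
    intro idx hm
    rw [iterGo, if_neg (by omega), endsFrom_nil tl wrap idx (by omega)]
    simp
  | succ m ih =>
    intro idx hm
    by_cases h : idx < tl.length
    · rw [iterGo, if_pos h]
      show ((idx : Int), (((if wrap then iterInner tl idx else idx) : Nat) : Int)) ::
          iterGo tl wrap ((if wrap then iterInner tl idx else idx) + 1) = _
      set j := if wrap then iterInner tl idx else idx with hj
      have hij : idx ≤ j := by
        rw [hj]; split
        · exact iterInner_ge tl idx
        · exact le_refl _
      have hjle : j ≤ tl.length - 1 := by
        rw [hj]; split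
        · exact iterInner_le tl idx (by omega)
        · omega
      have hpj : pvPred tl wrap j = true := by
        rw [hj]; split
        · rename_i hw; exact iterInner_pred tl wrap idx h hw
        · rename_i hw
          unfold pvPred
          simp only [Bool.not_eq_true] at hw
          simp [hw]
      have hmid : ∀ k, idx ≤ k → k < j → pvPred tl wrap k = false := by
        intro k hk1 hk2
        rw [hj] at hk2
        split at hk2
        · rename_i hw
          have hb := iterInner_between tl k tl.length idx (by omega) hk1 hk2
          have hne : k ≠ tl.length - 1 := by omega
          have hb2 := hb.2
          rw [List.getD_eq_getElem?_getD] at hb2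
          unfold pvPred
          simp [hw, hb2, hne]
        · omega
      rw [endsFrom_cons tl wrap idx j hij hjle h hpj hmid,
          ih (j + 1) (by omega)]
      rcases heq : endsFrom tl wrap (j + 1) with _ | ⟨e, rest⟩
      · simp
      · simp
    · rw [iterGo, if_neg h, endsFrom_nil tl wrap idx (by omega)]
      simp

-- ===== VERDICT (by name: the statement is the Claim_ definition above) =====
theorem iter_diff_logical_line_ranges_spec : Claim_equal_iter_diff_logical_line_ranges := by
  intro tl wrap _
  unfold Spec_iter_diff_logical_line_ranges iter_diff_logical_line_ranges
  rw [iterGo_eq tl wrap tl.length 0 (by omega)]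
  simp only [iter_diff_logical_line_ranges_alt, endsFrom,
    List.range_eq_range', Nat.sub_zero]
  rfl
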